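-- pv_equiv track=rewrite | github.com/mcjkurz/heart-space | scripts/find_stable_words.py | find_candidate_words
-- ===== SOURCE A (Python) =====
-- PERIODS = ['mingqing', 'late_qing', 'republican', 'socialist', 'contemporary']
--
-- def find_candidate_words(period_vocab, min_freq_per_period, min_word_length):
--     """Find words that appear in all periods with minimum frequency."""
--     candidates = None
--     for period in PERIODS:
--         if period not in period_vocab:
--             continue
--         words_above_threshold = set(
--             word for word, count in period_vocab[period].items()
--             if count >= min_freq_per_period and len(word) >= min_word_length
--         )
--         if candidates is None:
--             candidates = words_above_threshold
--         else:
--             candidates = candidates.intersection(words_above_threshold)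
--     return candidates or set()
-- ===== SOURCE B (Python) =====
-- PERIODS = ['mingqing', 'late_qing', 'republican', 'socialist', 'contemporary']
--
-- def find_candidate_words(period_vocab, min_freq_per_period, min_word_length):
--     """Tally, per word, in how many present periods it qualifies; keep the full-tally words."""
--     present = [p for p in PERIODS if p in period_vocab]
--     tally = {}
--     for period in present:
--         for word, count in period_vocab[period].items():
--             if count >= min_freq_per_period and len(word) >= min_word_length:
--                 tally[word] = tally.get(word, 0) + 1
--     return {word for word, c in tally.items() if c == len(present)}
-- ===== Notes on version B (the rewrite author's own statement) =====
-- stated objective: alternative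
-- what changed: B replaces A's running set-intersection (an Optional accumulator intersected per period) by a single per-word tally dict over all present periods, keeping the words whose tally equals the number of present periods.
import Mathlib
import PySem

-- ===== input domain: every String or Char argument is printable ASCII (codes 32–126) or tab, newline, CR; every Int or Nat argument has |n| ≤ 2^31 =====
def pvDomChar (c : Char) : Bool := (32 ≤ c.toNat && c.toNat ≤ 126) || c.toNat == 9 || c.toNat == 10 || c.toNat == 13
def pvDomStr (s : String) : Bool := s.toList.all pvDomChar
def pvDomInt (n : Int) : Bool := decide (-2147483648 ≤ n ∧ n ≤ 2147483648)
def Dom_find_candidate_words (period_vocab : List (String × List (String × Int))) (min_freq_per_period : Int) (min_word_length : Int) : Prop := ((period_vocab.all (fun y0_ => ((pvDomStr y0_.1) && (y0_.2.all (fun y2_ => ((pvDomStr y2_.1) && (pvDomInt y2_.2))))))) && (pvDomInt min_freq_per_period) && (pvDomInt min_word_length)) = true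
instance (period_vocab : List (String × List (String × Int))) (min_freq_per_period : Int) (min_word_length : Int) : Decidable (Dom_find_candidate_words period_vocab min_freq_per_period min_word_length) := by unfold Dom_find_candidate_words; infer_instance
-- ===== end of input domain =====

-- B replaces A's running set-intersection by a per-word tally over the present periods
-- (words whose tally equals the number of present periods); same return value, similar cost.
-- Both functions return a Python set; its elements are compared as a finite set.

def PERIODS : List String := ["mingqing", "late_qing", "republican", "socialist", "contemporary"]

-- ===== PORT A =====
-- 'candidates or set()': None ↦ set(); an empty candidates set also yields set() = the same [].
def find_candidate_words (period_vocab : List (String × List (String × Int))) (min_freq_per_period : Int) (min_word_length : Int) : List String :=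
  let d := PySem.Dict.ofList period_vocab
  let candidates : Option (PySem.Set String) :=
    PERIODS.foldl (fun cand period =>
      if d.contains period then
        let words_above_threshold : PySem.Set String :=
          PySem.Set.ofList (((PySem.Dict.ofList (d.getD period [])).items.filter
            (fun p => p.2 ≥ min_freq_per_period && PySem.Str.len p.1 ≥ min_word_length)).map Prod.fst)
        match cand with
        | none => some words_above_threshold
        | some c => some (PySem.Set.inter c words_above_threshold)
      else cand) none
  candidates.getD []

-- ===== PORT B =====
def find_candidate_words_alt (period_vocab : List (String × List (String × Int))) (min_freq_per_period : Int) (min_word_length : Int) : List String :=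
  let d := PySem.Dict.ofList period_vocab
  let present := PERIODS.filter (fun p => d.contains p)
  let tally : PySem.Dict String Int :=
    present.foldl (fun t period =>
      (PySem.Dict.ofList (d.getD period [])).items.foldl (fun t q =>
        if q.2 ≥ min_freq_per_period && PySem.Str.len q.1 ≥ min_word_length
        then t.insert q.1 (t.getD q.1 0 + 1) else t) t) PySem.Dict.empty
  PySem.Set.ofList ((tally.items.filter (fun p => p.2 == (present.length : Int))).map Prod.fst)

-- ===== PRECONDITION & SPEC =====
def Spec_find_candidate_words (period_vocab : List (String × List (String × Int))) (min_freq_per_period : Int) (min_word_length : Int) (out : List String) : Prop := out = find_candidate_words_alt period_vocab min_freq_per_period min_word_length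
instance (period_vocab : List (String × List (String × Int))) (min_freq_per_period : Int) (min_word_length : Int) (out : List String) : Decidable (Spec_find_candidate_words period_vocab min_freq_per_period min_word_length out) := by unfold Spec_find_candidate_words; infer_instance

-- ===== CLAIM (what is proved, stated in full; the proofs are below) =====
def Claim_equal_find_candidate_words : Prop := ∀ (period_vocab : List (String × List (String × Int))) (min_freq_per_period : Int) (min_word_length : Int), Dom_find_candidate_words period_vocab min_freq_per_period min_word_length → Spec_find_candidate_words period_vocab min_freq_per_period min_word_length (find_candidate_words period_vocab min_freq_per_period min_word_length)

-- ===== LEMMAS AND PROOFS =====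

-- does every list in qs contain k?
def allMem (qs : List (List String)) (k : String) : Bool := qs.all (fun q => q.contains k)

-- A's fold, abstracted over the per-period qualifying word lists
def aFold (qs : List (List String)) : List String :=
  (qs.foldl (fun cand q =>
    match cand with
    | none => some (PySem.Set.ofList q)
    | some c => some (PySem.Set.inter c (PySem.Set.ofList q))) none).getD []

-- B's result, abstracted likewise
def bRes (qs : List (List String)) : List String :=
  PySem.Set.ofList ((((qs.flatten.foldl (fun t x => t.insert x (t.getD x 0 + 1))
      PySem.Dict.empty).items.filter (fun p => p.2 == (qs.length : Int))).map Prod.fst))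

lemma count_flatten_le (qs : List (List String)) (k : String)
    (h : ∀ q ∈ qs, q.Nodup) : qs.flatten.count k ≤ qs.length := by
  induction qs with
  | nil => simp
  | cons q r ih =>
    have h1 : q.count k ≤ 1 := List.nodup_iff_count_le_one.mp (h q (by simp)) k
    have h2 := ih (fun q hq => h q (by simp [hq]))
    simp only [List.flatten_cons, List.count_append, List.length_cons]
    omega

lemma count_flatten_eq_length_iff (qs : List (List String)) (k : String)
    (h : ∀ q ∈ qs, q.Nodup) : (qs.flatten.count k = qs.length) ↔ ∀ q ∈ qs, k ∈ q := by
  induction qs with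
  | nil => simp
  | cons q r ih =>
    have h1 : q.count k ≤ 1 := List.nodup_iff_count_le_one.mp (h q (by simp)) k
    have h2 : r.flatten.count k ≤ r.length := count_flatten_le r k (fun q hq => h q (by simp [hq]))
    have hmem : (q.count k = 1) ↔ k ∈ q := by
      constructor
      · intro hc; have : 0 < q.count k := by omega
        exact List.count_pos_iff.mp this
      · intro hk; have : 0 < q.count k := List.count_pos_iff.mpr hk; omega
    have ihr := ih (fun q hq => h q (by simp [hq]))
    simp only [List.flatten_cons, List.count_append, List.length_cons, List.forall_mem_cons]
    constructor
    · intro he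
      have hq1 : q.count k = 1 := by omega
      have hr : r.flatten.count k = r.length := by omega
      exact ⟨hmem.mp hq1, ihr.mp hr⟩
    · rintro ⟨hk, hall⟩
      have := hmem.mpr hk
      have := ihr.mpr hall
      omega

lemma inter_foldl (rest : List (List String)) (s : PySem.Set String) :
    rest.foldl (fun c q => PySem.Set.inter c (PySem.Set.ofList q)) s
      = s.filter (fun k => allMem rest k) := by
  induction rest generalizing s with
  | nil => simp [allMem]
  | cons q r ih =>
    simp only [List.foldl_cons, ih]
    show (PySem.Set.inter s (PySem.Set.ofList q)).filter _ = _
    rw [PySem.Set.inter, List.filter_filter]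
    apply List.filter_congr
    intro k _
    simp [allMem, PySem.Set.mem_ofList, Bool.and_comm]

lemma aFold_opt (rest : List (List String)) (s : PySem.Set String) :
    (rest.foldl (fun cand q =>
      match cand with
      | none => some (PySem.Set.ofList q)
      | some c => some (PySem.Set.inter c (PySem.Set.ofList q))) (some s))
      = some (rest.foldl (fun c q => PySem.Set.inter c (PySem.Set.ofList q)) s) := by
  induction rest generalizing s with
  | nil => rfl
  | cons q r ih => simp only [List.foldl_cons, ih]

lemma key_lemma (qs : List (List String)) (h : ∀ q ∈ qs, q.Nodup) :
    aFold qs = bRes qs := by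
  have hcounter : qs.flatten.foldl (fun t x => t.insert x (t.getD x 0 + 1)) PySem.Dict.empty
      = PySem.Dict.counter qs.flatten := PySem.Dict.foldl_insert_getD_add_one_eq_counter _
  have hB : bRes qs = PySem.Set.ofList
      ((PySem.Set.ofList qs.flatten).filter (fun k => (qs.flatten.count k : Int) == (qs.length : Int))) := by
    rw [bRes, hcounter, PySem.Dict.items_counter, List.filter_map, List.map_map]
    simp [Function.comp_def]
  have hpred : ∀ k, ((qs.flatten.count k : Int) == (qs.length : Int)) = allMem qs k := by
    intro k
    have h2 := count_flatten_eq_length_iff qs k h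
    rw [Bool.eq_iff_iff]
    simp only [allMem, beq_iff_eq, Int.natCast_inj, List.all_eq_true, List.contains_iff_mem]
    exact h2
  rw [hB]
  have hBfilter : bRes qs = bRes qs := rfl
  rw [List.filter_congr (fun k _ => hpred k)]
  cases qs with
  | nil => rfl
  | cons q0 rest =>
    have hq0 : q0.Nodup := h q0 (by simp)
    -- A side
    have ha : aFold (q0 :: rest) = ((rest.foldl (fun cand q =>
        match cand with
        | none => some (PySem.Set.ofList q)
        | some c => some (PySem.Set.inter c (PySem.Set.ofList q)))
        (some (PySem.Set.ofList q0))).getD []) := rfl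
    rw [ha, aFold_opt, Option.getD_some, inter_foldl]
    -- B side: split ofList (q0 ++ flatten rest)
    rw [List.flatten_cons, PySem.Set.ofList_append, PySem.Set.update_eq_append_filter,
        List.filter_append, List.filter_filter]
    have hnil : (PySem.Set.ofList rest.flatten).filter
        (fun a => allMem (q0 :: rest) a && !(PySem.Set.ofList q0).contains a) = [] := by
      apply List.filter_eq_nil_iff.mpr
      intro a _
      by_cases ha : a ∈ q0
      · have hc : (PySem.Set.ofList q0).contains a = true := by
          simp [PySem.Set.contains_eq_listContains, PySem.Set.mem_ofList, ha]
        simp only [hc, Bool.not_true, Bool.and_false]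
        exact Bool.false_ne_true
      · simp only [Bool.and_eq_true, allMem, List.all_eq_true, not_and]
        intro hall _
        exact ha (List.contains_iff_mem.mp (hall q0 (by simp)))
    rw [hnil, List.append_nil, PySem.Set.ofList_eq_self_of_nodup q0 hq0]
    have hnodup : (q0.filter (fun k => allMem (q0 :: rest) k)).Nodup := hq0.filter _
    rw [PySem.Set.ofList_eq_self_of_nodup _ hnodup]
    apply List.filter_congr
    intro k hk
    simp [allMem, hk]

-- the qualifying word list of one period's (deduplicated) vocabulary is Nodup
lemma qual_nodup (inner : List (String × Int)) (P : String × Int → Bool) :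
    (((PySem.Dict.ofList inner).items.filter P).map Prod.fst).Nodup := by
  have hkeys : ((PySem.Dict.ofList inner).items.map Prod.fst).Nodup :=
    PySem.Dict.nodup_keys_ofList inner
  exact hkeys.sublist (List.Sublist.map Prod.fst List.filter_sublist)

-- ===== VERDICT (by name: the statement is the Claim_ definition above) =====
theorem find_candidate_words_spec : Claim_equal_find_candidate_words := by
  intro period_vocab min_freq_per_period min_word_length _
  unfold Spec_find_candidate_words
  set d := PySem.Dict.ofList period_vocab with hd
  set P : String × Int → Bool :=
    fun p => p.2 ≥ min_freq_per_period && PySem.Str.len p.1 ≥ min_word_length with hP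
  set w : String → List String :=
    fun period => ((PySem.Dict.ofList (d.getD period [])).items.filter P).map Prod.fst with hw
  set present := PERIODS.filter (fun p => d.contains p) with hpresent
  have hA : find_candidate_words period_vocab min_freq_per_period min_word_length
      = aFold (present.map w) := by
    show (PERIODS.foldl (fun cand period =>
        if d.contains period then
          match cand with
          | none => some (PySem.Set.ofList (w period))
          | some c => some (PySem.Set.inter c (PySem.Set.ofList (w period)))
        else cand) none).getD [] = _
    rw [aFold, List.foldl_map, hpresent, List.foldl_filter]
  have hBinner : ∀ (t : PySem.Dict String Int) (period : String),
      (PySem.Dict.ofList (d.getD period [])).items.foldl (fun t q =>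
        if P q then t.insert q.1 (t.getD q.1 0 + 1) else t) t
      = (w period).foldl (fun t x => t.insert x (t.getD x 0 + 1)) t := by
    intro t period
    rw [hw, List.foldl_map, List.foldl_filter]
  have hB : find_candidate_words_alt period_vocab min_freq_per_period min_word_length
      = bRes (present.map w) := by
    show PySem.Set.ofList (((present.foldl (fun t period =>
        (PySem.Dict.ofList (d.getD period [])).items.foldl (fun t q =>
          if P q then t.insert q.1 (t.getD q.1 0 + 1) else t) t)
        PySem.Dict.empty).items.filter
          (fun p => p.2 == (present.length : Int))).map Prod.fst) = _
    rw [bRes, List.length_map, List.foldl_flatten, List.foldl_map]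
    have : present.foldl (fun t period =>
        (PySem.Dict.ofList (d.getD period [])).items.foldl (fun t q =>
          if P q then t.insert q.1 (t.getD q.1 0 + 1) else t) t)
        (PySem.Dict.empty : PySem.Dict String Int)
      = present.foldl (fun t period =>
          (w period).foldl (fun t x => t.insert x (t.getD x 0 + 1)) t)
        (PySem.Dict.empty : PySem.Dict String Int) := by
      apply List.foldl_ext
      intro t period _
      exact hBinner t period
    rw [this]
  rw [hA, hB]
  exact key_lemma (present.map w) (by
    intro q hq
    obtain ⟨period, _, rfl⟩ := List.mem_map.mp hq
    exact qual_nodup _ _)
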